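-- pv_equiv track=rewrite | github.com/cesardelahaza/quantumMechanics | qState.py | generateAllPossibleStates
-- ===== SOURCE A (Python) =====
-- def generateAllPossibleStates(n_qubits: int, s: list[str] = [""]) -> list[str]:
--     """
--     This function generates all possible states with n_qubits.
--     Example: we have n_qubits=3, so this function will return
--     [[0,0,0],[0,0,1],[0,1,0],[0,1,1],[1,0,0]...]
--     :param n_qubits: number of qubits
--     :param s: to initialize the function s=[""]
--     :return:
--     """
--     if n_qubits == 0:
--         return s
--     else:
--         s0 = [subs+"0" for subs in s]
--         s1 = [subs+"1" for subs in s]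
--         return (generateAllPossibleStates(n_qubits-1, s0) +
--                 generateAllPossibleStates(n_qubits-1, s1))
-- ===== SOURCE B (Python) =====
-- def generateAllPossibleStates(n_qubits: int, s: list[str] = [""]) -> list[str]:
--     suffixes = [""]
--     for _ in range(n_qubits):
--         suffixes = [suf + b for suf in suffixes for b in "01"]
--     return [prefix + suf for suf in suffixes for prefix in s]
-- ===== Notes on version B (the rewrite author's own statement) =====
-- stated objective: alternative
-- what changed: Replaced the exponential recursion that extends every prefix at each of 2^n call-tree nodes with a single iterative loop that builds the 2^n bit-suffix strings once (counting order) and then one comprehension prepending each prefix from s; intended as a constant-factor speedup (measured ~1.8x at the largest size, below the 1.5x-at-timeout bar), claimed only as an alternative.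
import Mathlib
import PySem

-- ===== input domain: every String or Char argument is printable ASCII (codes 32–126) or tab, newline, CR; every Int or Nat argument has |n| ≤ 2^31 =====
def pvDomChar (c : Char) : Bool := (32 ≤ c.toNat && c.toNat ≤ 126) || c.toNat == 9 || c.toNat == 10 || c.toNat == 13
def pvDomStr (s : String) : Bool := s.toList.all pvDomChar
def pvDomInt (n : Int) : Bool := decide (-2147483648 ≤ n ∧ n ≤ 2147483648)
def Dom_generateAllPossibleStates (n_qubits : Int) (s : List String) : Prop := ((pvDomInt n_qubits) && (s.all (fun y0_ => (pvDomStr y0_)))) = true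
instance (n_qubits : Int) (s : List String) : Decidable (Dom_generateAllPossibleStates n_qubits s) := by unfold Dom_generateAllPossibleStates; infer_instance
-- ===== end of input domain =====

-- B builds the 2^n bit suffixes once with an iterative loop instead of A's recursive
-- doubling over prefixes; same values on Pre_ (n_qubits >= 0).

-- ===== PORT A =====
-- A recurses on n_qubits; on the admitted domain n_qubits ≥ 0 this is recursion on its Nat value.
def genAuxA : Nat → List String → List String
  | 0, s => s
  | Nat.succ k, s =>
    let s0 := s.map (fun subs => subs ++ "0")
    let s1 := s.map (fun subs => subs ++ "1")
    genAuxA k s0 ++ genAuxA k s1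

def generateAllPossibleStates (n_qubits : Int) (s : List String) : List String :=
  genAuxA n_qubits.toNat s

-- ===== PORT B =====
-- one loop step: [suf + b for suf in suffixes for b in "01"]
def stepB (suffixes : List String) : List String :=
  suffixes.flatMap (fun suf => ("01".toList).map (fun b => suf ++ String.ofList [b]))

def generateAllPossibleStates_alt (n_qubits : Int) (s : List String) : List String :=
  let suffixes := (PySem.List.pyRange 0 n_qubits 1).foldl (fun acc _ => stepB acc) [""]
  suffixes.flatMap (fun suf => s.map (fun pre => pre ++ suf))

-- ===== PRECONDITION & SPEC =====
-- Pre_ excludes n_qubits < 0, where Python A recurses forever (RecursionError).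
def Pre_generateAllPossibleStates (n_qubits : Int) (s : List String) : Prop := 0 ≤ n_qubits
instance (n_qubits : Int) (s : List String) : Decidable (Pre_generateAllPossibleStates n_qubits s) := by unfold Pre_generateAllPossibleStates; infer_instance
def pvWitness_generateAllPossibleStates : Int × List String := (2, [""])

def Spec_generateAllPossibleStates (n_qubits : Int) (s : List String) (out : List String) : Prop := out = generateAllPossibleStates_alt n_qubits s
instance (n_qubits : Int) (s : List String) (out : List String) : Decidable (Spec_generateAllPossibleStates n_qubits s out) := by unfold Spec_generateAllPossibleStates; infer_instance

-- ===== CLAIM (what is proved, stated in full; the proofs are below) =====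
def Claim_equal_generateAllPossibleStates : Prop := ∀ (n_qubits : Int) (s : List String), Dom_generateAllPossibleStates n_qubits s → Pre_generateAllPossibleStates n_qubits s → Spec_generateAllPossibleStates n_qubits s (generateAllPossibleStates n_qubits s)

-- ===== LEMMAS AND PROOFS =====

-- the loop step written with explicit two-element lists
theorem stepB_eq (x : List String) :
    stepB x = x.flatMap (fun suf => [suf ++ "0", suf ++ "1"]) := rfl

-- the loop body ignores the loop variable: the fold is an iterate
theorem foldl_stepB (l : List Int) (init : List String) :
    l.foldl (fun acc _ => stepB acc) init = stepB^[l.length] init := by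
  induction l generalizing init with
  | nil => rfl
  | cons a l ih => simp [List.foldl, ih, Function.iterate_succ_apply]

-- the iterated suffixes also satisfy the "prepend a bit" recurrence
theorem iterate_stepB_succ (n : Nat) :
    stepB^[n+1] [""] =
      (stepB^[n] [""]).map (fun w => "0" ++ w) ++ (stepB^[n] [""]).map (fun w => "1" ++ w) := by
  induction n with
  | zero => rfl
  | succ k ih =>
    rw [Function.iterate_succ_apply' stepB (k+1)]
    conv_lhs => rw [ih]
    rw [Function.iterate_succ_apply' stepB k]
    simp [stepB_eq, List.flatMap_append, List.map_flatMap, List.flatMap_map,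
      Function.comp_def, String.append_assoc]

-- characterisation of A's recursion by B's suffix list
theorem genAuxA_eq (n : Nat) (s : List String) :
    genAuxA n s = (stepB^[n] [""]).flatMap (fun suf => s.map (fun pre => pre ++ suf)) := by
  induction n generalizing s with
  | zero => simp [genAuxA]
  | succ k ih =>
    rw [iterate_stepB_succ]
    simp [genAuxA, ih, List.flatMap_append, List.flatMap_map, Function.comp_def,
      List.map_map, String.append_assoc]

-- ===== VERDICT (by name: the statement is the Claim_ definition above) =====
theorem generateAllPossibleStates_spec : Claim_equal_generateAllPossibleStates := by
  intro n s _ hpre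
  unfold Spec_generateAllPossibleStates generateAllPossibleStates generateAllPossibleStates_alt
  rw [foldl_stepB, PySem.List.length_pyRange_one, genAuxA_eq]
  simp
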